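-- pv_equiv track=rewrite | github.com/disolsons/EquiScale | src/processing/concept_inference/fuzzy_concept_matcher.py | _has_hard_conflict
-- ===== SOURCE A (Python) =====
-- def _has_hard_conflict(
--
--     text_a: str,
--     text_b: str,
--     hard_conflicts: list[tuple[str, str]],
-- ) -> bool:
--     """
--     Return True if the two texts contain opposite tokens from a hard-conflict pair.
--
--     Hard conflicts indicate mutually exclusive meanings where fuzzy matching
--     should be rejected entirely.
--     """
--     for left, right in hard_conflicts:
--         a_has_left = left in text_a
--         a_has_right = right in text_a
--         b_has_left = left in text_b
--         b_has_right = right in text_b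
--
--         if (a_has_left and b_has_right) or (a_has_right and b_has_left):
--             return True
--
--     return False
-- ===== SOURCE B (Python) =====
-- def _has_hard_conflict(
--     text_a: str,
--     text_b: str,
--     hard_conflicts: list[tuple[str, str]],
-- ) -> bool:
--     """
--     Found-set variant: first collect which conflict tokens occur in each text,
--     then symmetrize the pairs into a directed list and answer with a single
--     conjunction test against the two found sets (no substring work per pair).
--     """
--     found_a = {t for pair in hard_conflicts for t in pair if t in text_a}
--     found_b = {t for pair in hard_conflicts for t in pair if t in text_b}
--     directed = hard_conflicts + [(r, l) for l, r in hard_conflicts]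
--     return any(l in found_a and r in found_b for l, r in directed)
-- ===== Notes on version B (the rewrite author's own statement) =====
-- stated objective: alternative
-- what changed: B first scans the texts to build two found-sets of conflict tokens occurring in text_a and text_b, symmetrizes the pairs into a doubled directed list, and answers with one simple conjunctive membership pass; A instead recomputes four substring tests and a disjunction per pair with early return.
import Mathlib
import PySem

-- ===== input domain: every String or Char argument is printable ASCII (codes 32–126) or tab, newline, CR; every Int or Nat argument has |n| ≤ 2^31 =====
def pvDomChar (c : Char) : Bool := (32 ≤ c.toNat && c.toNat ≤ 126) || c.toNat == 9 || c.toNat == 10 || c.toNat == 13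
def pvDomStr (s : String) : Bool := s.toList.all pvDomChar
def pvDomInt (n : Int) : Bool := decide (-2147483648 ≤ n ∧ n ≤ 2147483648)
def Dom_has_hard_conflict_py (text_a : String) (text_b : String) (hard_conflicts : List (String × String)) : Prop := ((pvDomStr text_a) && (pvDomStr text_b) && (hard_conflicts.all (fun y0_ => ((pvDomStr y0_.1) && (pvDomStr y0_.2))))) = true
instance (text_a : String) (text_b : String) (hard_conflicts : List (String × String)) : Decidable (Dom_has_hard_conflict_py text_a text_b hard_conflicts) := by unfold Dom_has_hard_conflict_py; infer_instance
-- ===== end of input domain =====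

-- B replaces A's per-pair recomputation of four substring tests and a disjunction by a
-- staged algorithm: build the found-sets of conflict tokens occurring in each text, then
-- symmetrize the pairs into a doubled directed list and answer with one conjunctive
-- membership pass (objective: alternative structure; same result).

-- ===== PORT A =====
-- A's for-loop with early return, as structural recursion over the pair list.
def pvLoopA (text_a : String) (text_b : String) : List (String × String) → Bool
  | [] => false
  | (left, right) :: rest =>
    let a_has_left := PySem.Str.isIn left text_a
    let a_has_right := PySem.Str.isIn right text_a
    let b_has_left := PySem.Str.isIn left text_b
    let b_has_right := PySem.Str.isIn right text_b
    if (a_has_left && b_has_right) || (a_has_right && b_has_left) then true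
    else pvLoopA text_a text_b rest

def has_hard_conflict_py (text_a : String) (text_b : String) (hard_conflicts : List (String × String)) : Bool :=
  pvLoopA text_a text_b hard_conflicts

-- ===== PORT B =====
-- the token stream 'for pair in hard_conflicts for t in pair'
def pvTokens (hard_conflicts : List (String × String)) : List String :=
  hard_conflicts.flatMap (fun p => [p.1, p.2])

-- '{t for pair in hard_conflicts for t in pair if t in text}' — a set comprehension:
-- set of the tokens passing the filter, first occurrences in order
def pvFound (text : String) (hard_conflicts : List (String × String)) : PySem.Set String :=
  PySem.Set.ofList ((pvTokens hard_conflicts).filter (fun t => PySem.Str.isIn t text))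

def has_hard_conflict_py_alt (text_a : String) (text_b : String) (hard_conflicts : List (String × String)) : Bool :=
  let found_a := pvFound text_a hard_conflicts
  let found_b := pvFound text_b hard_conflicts
  let directed := hard_conflicts ++ hard_conflicts.map (fun p => (p.2, p.1))
  directed.any (fun p => PySem.Set.contains found_a p.1 && PySem.Set.contains found_b p.2)

-- ===== PRECONDITION & SPEC =====
def Spec_has_hard_conflict_py (text_a : String) (text_b : String) (hard_conflicts : List (String × String)) (out : Bool) : Prop := out = has_hard_conflict_py_alt text_a text_b hard_conflicts
instance (text_a : String) (text_b : String) (hard_conflicts : List (String × String)) (out : Bool) : Decidable (Spec_has_hard_conflict_py text_a text_b hard_conflicts out) := by unfold Spec_has_hard_conflict_py; infer_instance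

-- ===== CLAIM =====
def Claim_equal_has_hard_conflict_py : Prop := ∀ (text_a : String) (text_b : String) (hard_conflicts : List (String × String)), Dom_has_hard_conflict_py text_a text_b hard_conflicts → Spec_has_hard_conflict_py text_a text_b hard_conflicts (has_hard_conflict_py text_a text_b hard_conflicts)

-- ===== LEMMAS AND PROOFS =====

-- the direct per-pair predicate A computes
def pvPred (ta tb : String) (p : String × String) : Bool :=
  (PySem.Str.isIn p.1 ta && PySem.Str.isIn p.2 tb) || (PySem.Str.isIn p.2 ta && PySem.Str.isIn p.1 tb)

theorem pvLoopA_eq_any (ta tb : String) (ps : List (String × String)) :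
    pvLoopA ta tb ps = ps.any (pvPred ta tb) := by
  induction ps with
  | nil => rfl
  | cons p rest ih =>
    obtain ⟨l, r⟩ := p
    simp [pvLoopA, pvPred, ih]

theorem pv_any_or {α : Type} (l : List α) (f g : α → Bool) :
    l.any (fun x => f x || g x) = (l.any f || l.any g) := by
  induction l with
  | nil => rfl
  | cons a t ih => cases hf : f a <;> cases hg : g a <;> simp [List.any_cons, hf, hg, ih]

-- for a token appearing in the pair list, found-set membership IS the substring test
theorem pv_contains_found (text : String) (hc : List (String × String)) (t : String)
    (ht : t ∈ pvTokens hc) :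
    PySem.Set.contains (pvFound text hc) t = PySem.Str.isIn t text := by
  cases hi : PySem.Str.isIn t text with
  | true =>
    rw [(PySem.Set.contains_iff _ _) ]
    exact (PySem.Set.mem_ofList _ _).mpr (List.mem_filter.mpr ⟨ht, hi⟩)
  | false =>
    rw [Bool.eq_false_iff]
    intro hcon
    have := List.mem_filter.mp (((PySem.Set.mem_ofList _ _).mp ((PySem.Set.contains_iff _ _).mp hcon)))
    rw [hi] at this
    exact Bool.false_ne_true this.2

theorem pv_mem_tokens_left {hc : List (String × String)} {p : String × String} (hp : p ∈ hc) :
    p.1 ∈ pvTokens hc :=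
  List.mem_flatMap.mpr ⟨p, hp, by simp⟩

theorem pv_mem_tokens_right {hc : List (String × String)} {p : String × String} (hp : p ∈ hc) :
    p.2 ∈ pvTokens hc :=
  List.mem_flatMap.mpr ⟨p, hp, by simp⟩

-- ===== VERDICT =====
theorem has_hard_conflict_py_spec : Claim_equal_has_hard_conflict_py := by
  intro ta tb hc _
  unfold Spec_has_hard_conflict_py has_hard_conflict_py has_hard_conflict_py_alt
  rw [pvLoopA_eq_any]
  rw [List.any_append, List.any_map]
  rw [← pv_any_or]
  refine PySem.List.any_congr_mem ?_
  intro p hp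
  unfold pvPred
  rw [pv_contains_found ta hc p.1 (pv_mem_tokens_left hp),
      pv_contains_found tb hc p.2 (pv_mem_tokens_right hp),
      Function.comp]
  simp only []
  rw [pv_contains_found ta hc p.2 (pv_mem_tokens_right hp),
      pv_contains_found tb hc p.1 (pv_mem_tokens_left hp)]
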